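-- pv_equiv track=rewrite | github.com/sangwaboi/Resume-Parser-YECC | resume_parser.py | extract_section_boundaries
-- ===== SOURCE A (Python) =====
-- def extract_section_boundaries(resume_text):
--     """
--     Find major section boundaries in resume for intelligent chunking
--     Returns: dict with section positions
--     """
--     sections = {
--         'contact': (0, 500),
--         'summary': None,
--         'experience': None,
--         'projects': None,
--         'education': None,
--         'skills': None,
--         'certifications': None
--     }
--
--     lines = resume_text.split('\n')
--
--     keywords = {
--         'summary': ['summary', 'objective', 'profile', 'about'],
--         'experience': ['experience', 'employment', 'work history', 'professional experience'],
--         'projects': ['projects', 'project experience', 'erp projects'],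
--         'education': ['education', 'academic', 'qualification'],
--         'skills': ['skills', 'technical skills', 'competencies', 'expertise'],
--         'certifications': ['certifications', 'certificates', 'training', 'licenses']
--     }
--
--     char_count = 0
--     for i, line in enumerate(lines):
--         line_lower = line.lower().strip()
--
--         for section, words in keywords.items():
--             if any(word in line_lower for word in words):
--                 if sections[section] is None:
--                     sections[section] = (char_count, None)
--
--         char_count += len(line) + 1
--
--     section_list = [(k, v[0]) for k, v in sections.items() if v and isinstance(v, tuple)]
--     section_list.sort(key=lambda x: x[1])
--
--     for i in range(len(section_list) - 1):
--         section_name = section_list[i][0]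
--         start = section_list[i][1]
--         end = section_list[i + 1][1]
--         sections[section_name] = (start, end)
--
--     if section_list:
--         last_section = section_list[-1][0]
--         sections[last_section] = (section_list[-1][1], len(resume_text))
--
--     return sections
-- ===== SOURCE B (Python) =====
-- def extract_section_boundaries(resume_text):
--     """
--     Find major section boundaries in resume for intelligent chunking
--     Returns: dict with section positions
--     """
--     keywords = {
--         'summary': ['summary', 'objective', 'profile', 'about'],
--         'experience': ['experience', 'employment', 'work history', 'professional experience'],
--         'projects': ['projects', 'project experience', 'erp projects'],
--         'education': ['education', 'academic', 'qualification'],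
--         'skills': ['skills', 'technical skills', 'competencies', 'expertise'],
--         'certifications': ['certifications', 'certificates', 'training', 'licenses']
--     }
--
--     # pass 1: annotate each line with its normalized text and character offset
--     annotated = []
--     offset = 0
--     for line in resume_text.split('\n'):
--         annotated.append((line.lower().strip(), offset))
--         offset += len(line) + 1
--
--     # pass 2 (section-major): for each section, the offset of its first matching line
--     found = [('contact', 0)]
--     for section, words in keywords.items():
--         start = next((off for low, off in annotated
--                       if any(w in low for w in words)), None)
--         if start is not None:
--             found.append((section, start))
--     found.sort(key=lambda x: x[1])
--
--     # pass 3: each section ends where the next starts; the last runs to the end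
--     ends = [s for _, s in found[1:]] + [len(resume_text)]
--     sections = dict.fromkeys(('contact', 'summary', 'experience', 'projects',
--                               'education', 'skills', 'certifications'))
--     for (name, start), end in zip(found, ends):
--         sections[name] = (start, end)
--     return sections
-- ===== Notes on version B (the rewrite author's own statement) =====
-- stated objective: alternative
-- what changed: A marks section starts in the result dict during a line-major scan with a nested keyword loop, then extracts, sorts and index-loops to patch in ends; B stages three passes: annotate lines with offsets, a section-major first-match search per keyword group, then chain ends by zipping consecutive starts into a fresh dict.
import Mathlib
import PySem

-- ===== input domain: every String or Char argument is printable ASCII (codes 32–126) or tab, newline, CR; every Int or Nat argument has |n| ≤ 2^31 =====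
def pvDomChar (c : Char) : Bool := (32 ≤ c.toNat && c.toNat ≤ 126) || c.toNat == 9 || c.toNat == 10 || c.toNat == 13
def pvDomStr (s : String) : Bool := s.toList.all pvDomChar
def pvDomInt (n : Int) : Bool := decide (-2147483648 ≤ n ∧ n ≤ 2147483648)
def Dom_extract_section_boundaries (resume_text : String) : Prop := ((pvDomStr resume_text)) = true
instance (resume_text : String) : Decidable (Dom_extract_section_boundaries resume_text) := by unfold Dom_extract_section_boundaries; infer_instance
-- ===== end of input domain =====

-- B replaces A's line-major marking pass (dict of starts, then extract/sort/index-patch) by three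
-- staged passes: annotate lines with offsets, a section-major first-match search, then chain ends
-- by zipping; same return value.

-- ===== PORT A =====
-- the keywords dict of A (and B), as an association list in insertion order
def pvKeywords : List (String × List String) :=
  [("summary", ["summary", "objective", "profile", "about"]),
   ("experience", ["experience", "employment", "work history", "professional experience"]),
   ("projects", ["projects", "project experience", "erp projects"]),
   ("education", ["education", "academic", "qualification"]),
   ("skills", ["skills", "technical skills", "competencies", "expertise"]),
   ("certifications", ["certifications", "certificates", "training", "licenses"])]

-- dict values during A's run are None | (start, None) | (start, end): Option (Int × Option Int);
-- the final conversion to the declared Option (Int × Int) is the type convention (None ↦ none,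
-- (a, b) ↦ some (a, b); a dangling (a, None) never survives to the return).

-- body of A's inner 'for section, words in keywords.items()' loop
def pvKwStepA (line_lower : String) (cc : Int)
    (d : PySem.Dict String (Option (Int × Option Int))) (kw : String × List String) :
    PySem.Dict String (Option (Int × Option Int)) :=
  if kw.2.any (fun w => PySem.Str.isIn w line_lower) then
    (if d.getD kw.1 none = none then d.insert kw.1 (some (cc, none)) else d)
  else d

-- body of A's 'for i, line in enumerate(lines)' loop (state = (sections, char_count))
def pvLineStepA (st : PySem.Dict String (Option (Int × Option Int)) × Int) (line : String) :
    PySem.Dict String (Option (Int × Option Int)) × Int :=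
  let line_lower := PySem.Str.strip (PySem.Str.lower line)
  (pvKeywords.foldl (pvKwStepA line_lower st.2) st.1, st.2 + PySem.Str.len line + 1)

-- body of A's 'for i in range(len(section_list) - 1)' loop
def pvEndStepA (sl : List (String × Int)) (d : PySem.Dict String (Option (Int × Option Int)))
    (i : Int) : PySem.Dict String (Option (Int × Option Int)) :=
  let cur := PySem.List.pyGetD sl i ("", 0)
  let nxt := PySem.List.pyGetD sl (i + 1) ("", 0)
  d.insert cur.1 (some (cur.2, some nxt.2))

def extract_section_boundaries (resume_text : String) : List (String × Option (Int × Int)) :=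
  let sections0 : PySem.Dict String (Option (Int × Option Int)) :=
    PySem.Dict.ofList [("contact", some (0, some 500)), ("summary", none), ("experience", none),
      ("projects", none), ("education", none), ("skills", none), ("certifications", none)]
  -- resume_text.split('\n'); split? is some because the separator is non-empty
  let lines := (PySem.Str.split? resume_text "\n").getD []
  let st := lines.foldl pvLineStepA (sections0, 0)
  let section_list0 := st.1.items.filterMap (fun kv => kv.2.map (fun v => (kv.1, v.1)))
  let section_list := PySem.List.sorted section_list0 (fun x => x.2) false
  let d2 := (PySem.List.pyRange 0 ((section_list.length : Int) - 1)).foldl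
    (pvEndStepA section_list) st.1
  let d3 := if section_list.isEmpty then d2
    else
      let last := PySem.List.pyGetD section_list (-1) ("", 0)
      d2.insert last.1 (some (last.2, some (PySem.Str.len resume_text)))
  d3.items.map (fun kv => (kv.1, kv.2.bind (fun v => v.2.map (fun e => (v.1, e)))))

-- ===== PORT B =====
-- the key tuple of B's dict.fromkeys
def pvNames : List String :=
  ["contact", "summary", "experience", "projects", "education", "skills", "certifications"]

def extract_section_boundaries_alt (resume_text : String) : List (String × Option (Int × Int)) :=
  -- pass 1: annotate each line with its normalized text and character offset
  let annotated := ((PySem.Str.split? resume_text "\n").getD []).foldl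
    (fun (st : List (String × Int) × Int) line =>
      (st.1 ++ [(PySem.Str.strip (PySem.Str.lower line), st.2)], st.2 + PySem.Str.len line + 1))
    ([], 0) |>.1
  -- pass 2 (section-major): for each section, the offset of its first matching line
  let found0 := ("contact", (0 : Int)) ::
    pvKeywords.filterMap (fun kw =>
      (annotated.find? (fun p => kw.2.any (fun w => PySem.Str.isIn w p.1))).map
        (fun p => (kw.1, p.2)))
  let found := PySem.List.sorted found0 (fun x => x.2) false
  -- pass 3: each section ends where the next starts; the last runs to the end
  let ends := (PySem.List.slice found (some 1) none).map (·.2) ++ [PySem.Str.len resume_text]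
  let sections : PySem.Dict String (Option (Int × Int)) :=
    PySem.Dict.mk (pvNames.map (fun s => (s, none)))
  ((found.zip ends).foldl (fun d p => d.insert p.1.1 (some (p.1.2, p.2))) sections).items

-- ===== PRECONDITION & SPEC =====
def Spec_extract_section_boundaries (resume_text : String) (out : List (String × Option (Int × Int))) : Prop := out = extract_section_boundaries_alt resume_text
instance (resume_text : String) (out : List (String × Option (Int × Int))) : Decidable (Spec_extract_section_boundaries resume_text out) := by unfold Spec_extract_section_boundaries; infer_instance

-- ===== CLAIM (what is proved, stated in full; the proofs are below) =====
def Claim_equal_extract_section_boundaries : Prop := ∀ (resume_text : String), Dom_extract_section_boundaries resume_text → Spec_extract_section_boundaries resume_text (extract_section_boundaries resume_text)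

-- ===== LEMMAS AND PROOFS =====

def pvRank (s : String) : Nat := pvNames.idxOf s
def pvSlex (a b : String × Int) : Prop :=
  a.2 < b.2 ∨ (a.2 = b.2 ∧ pvRank a.1 < pvRank b.1)
def pvAssoc (F : List (String × Int)) (s : String) : Option Int :=
  (F.find? (fun e => e.1 == s)).map (·.2)
def pvVal (F : List (String × Int)) (s : String) : Option (Int × Option Int) :=
  if s = "contact" then some (0, some 500) else (pvAssoc F s).map (fun c => (c, none))
def pvDict (F : List (String × Int)) : PySem.Dict String (Option (Int × Option Int)) :=
  PySem.Dict.mk (pvNames.map (fun s => (s, pvVal F s)))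
def pvInv (F : List (String × Int)) (cc : Int) : Prop :=
  (∃ r, F = ("contact", 0) :: r) ∧ (F.map (·.1)).Nodup ∧ (∀ e ∈ F, e.1 ∈ pvNames) ∧
    F.Pairwise pvSlex ∧ (∀ e ∈ F, e.2 ≤ cc)

-- proof-side line-major first-match scan (the reference model both ports are reduced to)
def pvKwStepB (line_lower : String) (cc : Int) (f : List (String × Int))
    (kw : String × List String) : List (String × Int) :=
  if f.all (fun e => e.1 != kw.1) && kw.2.any (fun w => PySem.Str.isIn w line_lower) then
    f ++ [(kw.1, cc)]
  else f
def pvLineStepB (st : List (String × Int) × Int) (line : String) : List (String × Int) × Int :=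
  let line_lower := PySem.Str.strip (PySem.Str.lower line)
  (pvKeywords.foldl (pvKwStepB line_lower st.2) st.1, st.2 + PySem.Str.len line + 1)

-- annotated-lines list and the first-match offset of a section, as pure functions
def pvAnnF : Int → List String → List (String × Int)
  | _, [] => []
  | cc, l :: ls =>
    (PySem.Str.strip (PySem.Str.lower l), cc) :: pvAnnF (cc + PySem.Str.len l + 1) ls
def pvFirst (ws : List String) (ann : List (String × Int)) : Option Int :=
  (ann.find? (fun p => ws.any (fun w => PySem.Str.isIn w p.1))).map (·.2)

theorem pv_get?_mk {ν : Type} (l : List (String × ν)) (s : String) :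
    (PySem.Dict.mk l).get? s = (l.find? (fun p => p.1 == s)).map (·.2) := by
  induction l with
  | nil => simp [PySem.Dict.get?]
  | cons p rest ih =>
    rw [List.find?_cons, PySem.Dict.get?_mk_cons]
    by_cases h : p.1 == s
    · simp [h]
    · simp only [h, ih]; simp at h ⊢
theorem pv_find?_graph {ν : Type} (names : List String) (f : String → ν) (s : String) :
    ((names.map (fun t => (t, f t))).find? (fun p => p.1 == s)) =
      if s ∈ names then some (s, f s) else none := by
  induction names with
  | nil => simp
  | cons t rest ih =>
    simp only [List.map_cons, List.find?_cons]
    by_cases h : t = s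
    · subst h; simp
    · have : ((t, f t).1 == s) = false := by simp [h]
      simp [this, ih, Ne.symm h]
theorem pvDict_get? (F : List (String × Int)) (s : String) (h : s ∈ pvNames) :
    (pvDict F).get? s = some (pvVal F s) := by
  rw [pvDict, pv_get?_mk, pv_find?_graph]
  simp [h]
theorem pvAssoc_eq_none_iff (F : List (String × Int)) (s : String) :
    pvAssoc F s = none ↔ s ∉ F.map (·.1) := by
  unfold pvAssoc
  rw [Option.map_eq_none_iff, List.find?_eq_none]
  constructor
  · intro h hm
    obtain ⟨e, he, h1⟩ := List.mem_map.mp hm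
    exact (h e he) (by simp [h1])
  · intro h e he hb
    exact h (List.mem_map.mpr ⟨e, he, by simpa using hb⟩)
theorem pvAssoc_append_self (F : List (String × Int)) (s : String) (c : Int)
    (h : s ∉ F.map (·.1)) : pvAssoc (F ++ [(s, c)]) s = some c := by
  rw [pvAssoc, List.find?_append]
  have : F.find? (fun e => e.1 == s) = none := by
    rw [List.find?_eq_none]; intro e he hb; exact h (List.mem_map.mpr ⟨e, he, by simpa using hb⟩)
  simp [this]
theorem pvAssoc_append_of_ne (F : List (String × Int)) (s t : String) (c : Int)
    (h : t ≠ s) : pvAssoc (F ++ [(s, c)]) t = pvAssoc F t := by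
  rw [pvAssoc, List.find?_append, pvAssoc]
  have : ([((s : String), (c : Int))].find? (fun e => e.1 == t)) = none := by simp [Ne.symm h]
  simp [this]
theorem pvAssoc_self (F : List (String × Int)) (e : String × Int)
    (hnd : (F.map (·.1)).Nodup) (he : e ∈ F) : pvAssoc F e.1 = some e.2 := by
  induction F with
  | nil => simp at he
  | cons p rest ih =>
    rcases List.mem_cons.mp he with he | he
    · subst he; simp [pvAssoc]
    · have hne : p.1 ≠ e.1 := by
        rw [List.map_cons, List.nodup_cons] at hnd
        intro hx
        exact hnd.1 (hx ▸ List.mem_map.mpr ⟨e, he, rfl⟩)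
      rw [pvAssoc, List.find?_cons]
      simp only [show (p.1 == e.1) = false by simp [hne]]
      rw [List.map_cons, List.nodup_cons] at hnd
      exact ih hnd.2 he
theorem pvRank_pos (s : String) (h : s ∈ pvNames) (hs : s ≠ "contact") : 0 < pvRank s := by
  unfold pvRank pvNames at *
  fin_cases h <;> simp_all
theorem pvDict_insert (F : List (String × Int)) (s : String) (cc : Int)
    (h : s ∈ pvNames) (hs : s ≠ "contact") (hnot : s ∉ F.map (·.1)) :
    (pvDict F).insert s (some (cc, none)) = pvDict (F ++ [(s, cc)]) := by
  apply PySem.Dict.ext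
  have hcont : (pvDict F).contains s = true := by
    rw [PySem.Dict.contains_eq_isSome_get?, pvDict_get? F s h]; rfl
  rw [PySem.Dict.items_insert_of_contains _ _ hcont]
  show ((pvNames.map (fun t => (t, pvVal F t))).map _) = _
  rw [List.map_map]
  show _ = pvNames.map (fun t => (t, pvVal (F ++ [(s, cc)]) t))
  apply List.map_congr_left
  intro t ht
  by_cases hts : t = s
  · subst hts
    simp only [Function.comp, beq_iff_eq, if_true]
    rw [pvVal, if_neg hs, pvAssoc_append_self F t cc hnot]
    simp
  · simp only [Function.comp, beq_iff_eq, if_neg hts]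
    rw [pvVal, pvVal]
    by_cases htc : t = "contact"
    · simp [htc]
    · rw [if_neg htc, if_neg htc, pvAssoc_append_of_ne F s t cc hts]
theorem pvInsertBy_pairwise {α : Type} (key : α → Int) (S : α → α → Prop) (x : α) (ys : List α)
    (h1 : ys.Pairwise (fun a b => key a < key b ∨ (key a = key b ∧ S a b)))
    (h2 : ∀ y ∈ ys, S y x) :
    (PySem.List.insertBy (fun a b => decide (key a < key b)) x ys).Pairwise
      (fun a b => key a < key b ∨ (key a = key b ∧ S a b)) := by
  induction ys with
  | nil => simp [PySem.List.insertBy]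
  | cons y ys ih =>
    rw [PySem.List.insertBy]
    by_cases hb : key x < key y
    · simp only [hb, decide_true, if_true]
      refine List.Pairwise.cons ?_ h1
      intro z hz
      rcases List.mem_cons.mp hz with hz | hz
      · subst hz; exact Or.inl hb
      · rcases List.rel_of_pairwise_cons h1 hz with h | ⟨h, _⟩
        · exact Or.inl (lt_trans hb h)
        · exact Or.inl (h ▸ hb)
    · simp only [hb, decide_false]
      refine List.Pairwise.cons ?_ (ih h1.tail (fun z hz => h2 z (List.mem_cons_of_mem _ hz)))
      intro z hz
      rcases (PySem.List.mem_insertBy _ _ _ _).mp hz with hz | hz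
      · subst hz
        rcases lt_or_eq_of_le (le_of_not_gt hb) with h | h
        · exact Or.inl h
        · exact Or.inr ⟨h.symm ▸ rfl, h2 y (List.mem_cons_self)⟩
      · exact List.rel_of_pairwise_cons h1 hz
theorem pvSorted_pairwise_stable {α : Type} (key : α → Int) (S : α → α → Prop) (xs : List α)
    (hxs : xs.Pairwise S) :
    (PySem.List.sorted xs key false).Pairwise
      (fun a b => key a < key b ∨ (key a = key b ∧ S a b)) := by
  rw [PySem.List.sorted_eq_foldl_insertBy]
  suffices H : ∀ (l : List α) (acc : List α), l.Pairwise S →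
      acc.Pairwise (fun a b => key a < key b ∨ (key a = key b ∧ S a b)) →
      (∀ y ∈ acc, ∀ x ∈ l, S y x) →
      (l.foldl (fun acc x => PySem.List.insertBy (fun a b => decide (key a < key b)) x acc) acc).Pairwise
        (fun a b => key a < key b ∨ (key a = key b ∧ S a b)) by
    exact H xs [] hxs (by simp) (by simp)
  intro l
  induction l with
  | nil => intro acc _ h _; simpa using h
  | cons x t ih =>
    intro acc hp hacc hS
    simp only [List.foldl_cons]
    refine ih _ hp.tail
      (pvInsertBy_pairwise key S x acc hacc (fun y hy => hS y hy x List.mem_cons_self)) ?_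
    intro y hy x' hx'
    rcases (PySem.List.mem_insertBy _ _ _ _).mp hy with hz | hz
    · subst hz; exact List.rel_of_pairwise_cons hp hx'
    · exact hS y hz x' (List.mem_cons_of_mem _ hx')
def pvChunks : List (String × Int) → Int → List (String × (Int × Int))
  | [], _ => []
  | [e], n => [(e.1, (e.2, n))]
  | e :: e' :: t, n => (e.1, (e.2, e'.2)) :: pvChunks (e' :: t) n
def pvApply {ν : Type} (upds : List (String × ν)) (f : String → ν) : String → ν :=
  upds.foldl (fun g u => fun t => if t = u.1 then u.2 else g t) f
theorem pvChunks_map_fst (F : List (String × Int)) (n : Int) :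
    (pvChunks F n).map (·.1) = F.map (·.1) := by
  induction F with
  | nil => rfl
  | cons e t ih =>
    cases t with
    | nil => rfl
    | cons e' t' => simpa [pvChunks] using ih
theorem pvChunks_zip (F : List (String × Int)) (n : Int) :
    ((F.zip ((F.drop 1).map (·.2) ++ [n])).map (fun p => (p.1.1, (p.1.2, p.2)))) =
      pvChunks F n := by
  induction F with
  | nil => rfl
  | cons e t ih =>
    cases t with
    | nil => rfl
    | cons e' t' => simpa [pvChunks] using ih
theorem pvChunks_decomp (F : List (String × Int)) (hne : F ≠ []) (n : Int) :
    pvChunks F n =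
      (F.zip (F.drop 1)).map (fun p => (p.1.1, (p.1.2, p.2.2))) ++
        [((F.getLast hne).1, ((F.getLast hne).2, n))] := by
  induction F with
  | nil => exact absurd rfl hne
  | cons e t ih =>
    cases t with
    | nil => rfl
    | cons e' t' =>
      rw [pvChunks, ih (by simp)]
      simp [List.getLast]
theorem pv_find?_map_fst {ν ν' : Type} (l : List (String × ν)) (w : String × ν → ν') (s : String) :
    ((l.map (fun q => (q.1, w q))).find? (fun u => u.1 == s)) =
      (l.find? (fun q => q.1 == s)).map (fun q => (q.1, w q)) := by
  induction l with
  | nil => rfl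
  | cons q t ih =>
    simp only [List.map_cons, List.find?_cons]
    by_cases h : q.1 == s
    · simp [h]
    · simp only [h]; simp only [show ((q.1 : String) == s) = false from by simpa using h] at *
      exact ih
theorem pvApply_find? {ν : Type} (upds : List (String × ν))
    (f : String → ν) (s : String)
    (hnd : (upds.map (·.1)).Nodup) :
    pvApply upds f s = ((upds.find? (fun u => u.1 == s)).map (·.2)).getD (f s) := by
  induction upds generalizing f with
  | nil => rfl
  | cons u t ih =>
    rw [List.map_cons, List.nodup_cons] at hnd
    rw [pvApply, List.foldl_cons, List.find?_cons]
    by_cases h : u.1 = s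
    · subst h
      simp only [beq_self_eq_true]
      have hnone : t.find? (fun p => p.1 == u.1) = none := by
        rw [List.find?_eq_none]
        intro e he hb
        exact hnd.1 (List.mem_map.mpr ⟨e, he, by simpa using hb⟩)
      rw [show (List.foldl (fun g u => fun t => if t = u.1 then u.2 else g t) _ t) = pvApply t _ from rfl,
        ih _ hnd.2, hnone]
      simp
    · simp only [show ((u.1 : String) == s) = false from by simpa using h]
      rw [show (List.foldl (fun g u => fun t => if t = u.1 then u.2 else g t) _ t) = pvApply t _ from rfl,
        ih _ hnd.2]
      simp only [if_neg (Ne.symm h)]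
theorem pvDict_foldl_insert {ν : Type} (upds : List (String × ν))
    (f : String → ν)
    (h : ∀ u ∈ upds, u.1 ∈ pvNames) :
    upds.foldl (fun d u => d.insert u.1 u.2) (PySem.Dict.mk (pvNames.map (fun s => (s, f s)))) =
      PySem.Dict.mk (pvNames.map (fun s => (s, pvApply upds f s))) := by
  induction upds generalizing f with
  | nil => rfl
  | cons u t ih =>
    rw [List.foldl_cons]
    have hcont : (PySem.Dict.mk (pvNames.map (fun s => (s, f s)))).contains u.1 = true := by
      rw [PySem.Dict.contains_eq_isSome_get?, pv_get?_mk, pv_find?_graph]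
      simp [h u List.mem_cons_self]
    have hins : (PySem.Dict.mk (pvNames.map (fun s => (s, f s)))).insert u.1 u.2 =
        PySem.Dict.mk (pvNames.map (fun s => (s, if s = u.1 then u.2 else f s))) := by
      apply PySem.Dict.ext
      rw [PySem.Dict.items_insert_of_contains _ _ hcont]
      show ((pvNames.map (fun t => (t, f t))).map _) = pvNames.map (fun s => (s, if s = u.1 then u.2 else f s))
      rw [List.map_map]
      apply List.map_congr_left
      intro t _
      by_cases hts : t = u.1
      · subst hts; simp
      · simp [hts]
    rw [hins, ih _ (fun v hv => h v (List.mem_cons_of_mem _ hv))]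
    rfl
theorem pvKwFold (kws : List (String × List String)) (ll : String) (F : List (String × Int))
    (cc : Int)
    (hsub : ∀ kw ∈ kws, kw.1 ∈ pvNames ∧ kw.1 ≠ "contact")
    (hkpair : kws.Pairwise (fun a b => pvRank a.1 < pvRank b.1))
    (hinv : pvInv F cc)
    (hcc : ∀ e ∈ F, e.2 = cc → ∀ kw ∈ kws, pvRank e.1 < pvRank kw.1) :
    kws.foldl (pvKwStepA ll cc) (pvDict F) = pvDict (kws.foldl (pvKwStepB ll cc) F) ∧
      pvInv (kws.foldl (pvKwStepB ll cc) F) cc := by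
  induction kws generalizing F with
  | nil => exact ⟨rfl, hinv⟩
  | cons kw kws ih =>
    obtain ⟨hmem, hnc⟩ := hsub kw List.mem_cons_self
    obtain ⟨⟨r, hr⟩, hnd, hnames, hpw, hle⟩ := hinv
    simp only [List.foldl_cons]
    by_cases hm : kw.2.any (fun w => PySem.Str.isIn w ll)
    · by_cases hin : kw.1 ∈ F.map (·.1)
      · -- already recorded: both sides unchanged
        have hA : pvKwStepA ll cc (pvDict F) kw = pvDict F := by
          rw [pvKwStepA, if_pos hm, PySem.Dict.getD_eq_get?_getD, pvDict_get? F kw.1 hmem]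
          have : pvVal F kw.1 ≠ none := by
            rw [pvVal, if_neg hnc]
            simp only [ne_eq, Option.map_eq_none_iff]
            rw [← ne_eq, Option.ne_none_iff_exists']
            obtain ⟨e, he, h1⟩ := List.mem_map.mp hin
            exact ⟨e.2, by rw [← h1]; exact pvAssoc_self F e hnd he⟩
          simp [this]
        have hB : pvKwStepB ll cc F kw = F := by
          have hallf : (F.all (fun e => e.1 != kw.1)) = false := by
            obtain ⟨e, he, h1⟩ := List.mem_map.mp hin
            rw [List.all_eq_false]
            exact ⟨e, he, by simp [h1]⟩
          rw [pvKwStepB, hallf]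
          simp
        rw [hA, hB]
        exact ih F (fun k hk => hsub k (List.mem_cons_of_mem _ hk)) hkpair.tail
          ⟨⟨r, hr⟩, hnd, hnames, hpw, hle⟩
          (fun e he h2 k hk => hcc e he h2 k (List.mem_cons_of_mem _ hk))
      · -- new section: both sides record (kw.1, cc)
        have hA : pvKwStepA ll cc (pvDict F) kw = pvDict (F ++ [(kw.1, cc)]) := by
          rw [pvKwStepA, if_pos hm, PySem.Dict.getD_eq_get?_getD, pvDict_get? F kw.1 hmem]
          have : pvVal F kw.1 = none := by
            rw [pvVal, if_neg hnc, (pvAssoc_eq_none_iff F kw.1).mpr hin]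
            rfl
          rw [Option.getD_some, if_pos this]
          exact pvDict_insert F kw.1 cc hmem hnc hin
        have hB : pvKwStepB ll cc F kw = F ++ [(kw.1, cc)] := by
          rw [pvKwStepB, if_pos]
          rw [Bool.and_eq_true]
          refine ⟨?_, hm⟩
          rw [List.all_eq_true]
          intro e he
          simp only [bne_iff_ne, ne_eq]
          intro h1
          exact hin (List.mem_map.mpr ⟨e, he, h1⟩)
        rw [hA, hB]
        have hslex : ∀ e ∈ F, pvSlex e (kw.1, cc) := by
          intro e he
          rcases lt_or_eq_of_le (hle e he) with h | h
          · exact Or.inl h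
          · exact Or.inr ⟨h, hcc e he h kw List.mem_cons_self⟩
        refine ih (F ++ [(kw.1, cc)]) (fun k hk => hsub k (List.mem_cons_of_mem _ hk)) hkpair.tail
          ⟨⟨r ++ [(kw.1, cc)], by rw [hr]; rfl⟩, ?_, ?_, ?_, ?_⟩ ?_
        · rw [List.map_append, List.nodup_append]
          refine ⟨hnd, by simp, ?_⟩
          intro a ha b hb
          simp at hb
          intro h
          rw [h, hb] at ha
          exact hin ha
        · intro e he
          rcases List.mem_append.mp he with h | h
          · exact hnames e h
          · simp at h; rw [h]; exact hmem
        · rw [List.pairwise_append]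
          exact ⟨hpw, List.pairwise_singleton _ _, fun a ha b hb => by
            simp at hb; rw [hb]; exact hslex a ha⟩
        · intro e he
          rcases List.mem_append.mp he with h | h
          · exact hle e h
          · simp at h; rw [h]
        · intro e he h2 k hk
          rcases List.mem_append.mp he with h | h
          · exact hcc e h h2 k (List.mem_cons_of_mem _ hk)
          · simp at h
            have hir : pvRank kw.1 < pvRank k.1 := List.rel_of_pairwise_cons hkpair hk
            rw [h]; exact hir
    · have hA : pvKwStepA ll cc (pvDict F) kw = pvDict F := by rw [pvKwStepA, if_neg hm]
      have hB : pvKwStepB ll cc F kw = F := by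
        rw [pvKwStepB, if_neg]; simp only [Bool.and_eq_true, not_and]; intro _; exact hm
      rw [hA, hB]
      exact ih F (fun k hk => hsub k (List.mem_cons_of_mem _ hk)) hkpair.tail
        ⟨⟨r, hr⟩, hnd, hnames, hpw, hle⟩
        (fun e he h2 k hk => hcc e he h2 k (List.mem_cons_of_mem _ hk))
theorem pvScan (lines : List String) (F : List (String × Int)) (cc : Int)
    (hinv : pvInv F cc) (hline : ∀ e ∈ F, e.2 < cc ∨ e = ("contact", 0)) :
    lines.foldl pvLineStepA (pvDict F, cc) =
        (pvDict (lines.foldl pvLineStepB (F, cc)).1, (lines.foldl pvLineStepB (F, cc)).2) ∧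
      pvInv (lines.foldl pvLineStepB (F, cc)).1 (lines.foldl pvLineStepB (F, cc)).2 ∧
      (∀ e ∈ (lines.foldl pvLineStepB (F, cc)).1,
        e.2 < (lines.foldl pvLineStepB (F, cc)).2 ∨ e = ("contact", 0)) := by
  induction lines generalizing F cc with
  | nil => exact ⟨rfl, hinv, hline⟩
  | cons line rest ih =>
    simp only [List.foldl_cons]
    have hsub : ∀ kw ∈ pvKeywords, kw.1 ∈ pvNames ∧ kw.1 ≠ "contact" := by decide
    have hkpair : pvKeywords.Pairwise (fun a b => pvRank a.1 < pvRank b.1) := by decide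
    have hcc : ∀ e ∈ F, e.2 = cc → ∀ kw ∈ pvKeywords, pvRank e.1 < pvRank kw.1 := by
      intro e he h2 kw hkw
      rcases hline e he with h | h
      · omega
      · rw [h]
        have h0 : pvRank ("contact", (0 : Int)).1 = 0 := by decide
        rw [h0]
        exact pvRank_pos kw.1 (hsub kw hkw).1 (hsub kw hkw).2
    obtain ⟨hdict, hinv'⟩ :=
      pvKwFold pvKeywords (PySem.Str.strip (PySem.Str.lower line)) F cc hsub hkpair hinv hcc
    have hlen : 0 ≤ PySem.Str.len line := by rw [PySem.Str.len_eq]; positivity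
    have hstepA : pvLineStepA (pvDict F, cc) line =
        (pvDict (pvKeywords.foldl (pvKwStepB (PySem.Str.strip (PySem.Str.lower line)) cc) F),
          cc + PySem.Str.len line + 1) := by
      rw [pvLineStepA]
      exact congrArg (fun d => (d, cc + PySem.Str.len line + 1)) hdict
    have hstepB : pvLineStepB (F, cc) line =
        (pvKeywords.foldl (pvKwStepB (PySem.Str.strip (PySem.Str.lower line)) cc) F,
          cc + PySem.Str.len line + 1) := rfl
    rw [hstepA, hstepB]
    obtain ⟨h1, h2, h3, h4, h5⟩ := hinv'
    exact ih _ _ ⟨h1, h2, h3, h4, fun e he => le_trans (h5 e he) (by omega)⟩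
      (fun e he => Or.inl (lt_of_le_of_lt (h5 e he) (by omega)))
theorem pv_filterMap_ifmem {ν : Type} (names : List String) (P : String → Prop)
    [DecidablePred P] (g : String → ν) :
    names.filterMap (fun s => if P s then some (g s) else none) =
      (names.filter (fun s => decide (P s))).map g := by
  induction names with
  | nil => rfl
  | cons t rest ih =>
    by_cases h : P t
    · simp [h, ih]
    · simp [h, ih]

theorem pvSectionList (F : List (String × Int)) (cc : Int) (hinv : pvInv F cc) :
    PySem.List.sorted ((pvDict F).items.filterMap (fun kv => kv.2.map (fun v => (kv.1, v.1))))
      (fun x => x.2) false = F := by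
  obtain ⟨⟨r, hr⟩, hnd, hnames, hpw, _⟩ := hinv
  have hitems : (pvDict F).items = pvNames.map (fun s => (s, pvVal F s)) := rfl
  rw [hitems, List.filterMap_map]
  have hpoint : ∀ s : String,
      ((fun kv : String × Option (Int × Option Int) => kv.2.map (fun v => (kv.1, v.1))) ∘
        (fun s => (s, pvVal F s))) s =
      if s ∈ F.map (·.1) then some (s, (pvAssoc F s).getD 0) else none := by
    intro s
    simp only [Function.comp]
    by_cases hc : s = "contact"
    · subst hc
      have hmem : "contact" ∈ F.map (·.1) := by rw [hr]; exact List.mem_cons_self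
      have hassoc : pvAssoc F "contact" = some 0 := by rw [hr]; rfl
      rw [if_pos hmem, pvVal, if_pos rfl, hassoc]
      rfl
    · rw [pvVal, if_neg hc]
      by_cases hmem : s ∈ F.map (·.1)
      · obtain ⟨e, he, h1⟩ := List.mem_map.mp hmem
        have hassoc : pvAssoc F s = some e.2 := h1 ▸ pvAssoc_self F e hnd he
        rw [if_pos hmem, hassoc]
        rfl
      · rw [if_neg hmem, (pvAssoc_eq_none_iff F s).mpr hmem]
        rfl
  rw [List.filterMap_congr (fun s _ => hpoint s),
    pv_filterMap_ifmem pvNames (fun s => s ∈ F.map (·.1)) (fun s => (s, (pvAssoc F s).getD 0))]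
  set sl0 := (pvNames.filter (fun s => decide (s ∈ F.map (·.1)))).map
    (fun s => (s, (pvAssoc F s).getD 0)) with hsl0
  have hFeq : (F.map (·.1)).map (fun s => (s, (pvAssoc F s).getD 0)) = F := by
    rw [List.map_map]
    have : ∀ e ∈ F, ((fun s => (s, (pvAssoc F s).getD 0)) ∘ (·.1)) e = id e := by
      intro e he
      simp only [Function.comp, id]
      rw [pvAssoc_self F e hnd he]
      simp
    rw [List.map_congr_left this, List.map_id]
  have hperm : sl0.Perm F := by
    have hnodnames : pvNames.Nodup := by decide
    have hpn : (pvNames.filter (fun s => decide (s ∈ F.map (·.1)))).Perm (F.map (·.1)) := by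
      apply (List.perm_ext_iff_of_nodup (List.Nodup.filter _ hnodnames) hnd).mpr
      intro s
      rw [List.mem_filter]
      simp only [decide_eq_true_eq]
      constructor
      · exact fun h => h.2
      · intro h
        obtain ⟨e, he, h1⟩ := List.mem_map.mp h
        exact ⟨h1 ▸ hnames e he, h⟩
    calc sl0.Perm ((F.map (·.1)).map (fun s => (s, (pvAssoc F s).getD 0))) := hpn.map _
    _ = F := hFeq
  have hpair0 : sl0.Pairwise (fun a b => pvRank a.1 < pvRank b.1) := by
    rw [hsl0, List.pairwise_map]
    have hpn : pvNames.Pairwise (fun a b => pvRank a < pvRank b) := by decide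
    exact List.Pairwise.sublist (List.filter_sublist) hpn
  have hsorted := pvSorted_pairwise_stable (fun x : String × Int => x.2)
    (fun a b => pvRank a.1 < pvRank b.1) sl0 hpair0
  refine List.Perm.eq_of_pairwise ?_ hsorted hpw ((PySem.List.sorted_perm sl0 _ _).trans hperm)
  intro a b _ _ h1 h2
  rcases h1 with h1 | ⟨h1, h1'⟩ <;> rcases h2 with h2 | ⟨h2, h2'⟩ <;> omega
theorem pv_pyGetD_neg_one {α : Type} (F : List α) (hne : F ≠ []) (d : α) :
    PySem.List.pyGetD F (-1) d = F.getLast hne := by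
  simp only [PySem.List.pyGetD, PySem.List.pyGet?, PySem.List.pyIdx?]
  have hpos : 0 < F.length := List.length_pos_iff.mpr hne
  rw [if_neg (by norm_num), if_pos (show -(F.length:Int) ≤ -1 by omega)]
  have : (F.length - (-(-1:Int)).toNat) = F.length - 1 := by norm_num
  rw [this, Option.bind_some, List.getElem?_eq_getElem (by omega), Option.getD_some,
    List.getLast_eq_getElem]
theorem pvEndFold (F : List (String × Int)) (hne : F ≠ [])
    (d : PySem.Dict String (Option (Int × Option Int))) :
    (PySem.List.pyRange 0 ((F.length : Int) - 1)).foldl (pvEndStepA F) d =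
      ((F.zip (F.drop 1)).map (fun p => (p.1.1, some (p.1.2, some p.2.2)))).foldl
        (fun d (u : String × Option (Int × Option Int)) => d.insert u.1 u.2) d := by
  have hpos : 0 < F.length := List.length_pos_iff.mpr hne
  have hzlen : (F.zip (F.drop 1)).length = F.length - 1 := by
    rw [List.length_zip, List.length_drop]
    omega
  rw [List.foldl_map]
  have hcongr : ∀ (acc : PySem.Dict String (Option (Int × Option Int))),
      ∀ i ∈ PySem.List.pyRange 0 ((F.length : Int) - 1),
      pvEndStepA F acc i =
        (fun acc (p : (String × Int) × (String × Int)) =>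
          acc.insert p.1.1 (some (p.1.2, some p.2.2))) acc
          (PySem.List.pyGetD (F.zip (F.drop 1)) i (("", 0), ("", 0))) := by
    intro acc i hi
    rw [PySem.List.mem_pyRange_one] at hi
    have h1 : i < (F.length : Int) := by omega
    have h2 : i + 1 < (F.length : Int) := by omega
    have h3 : i < ((F.zip (F.drop 1)).length : Int) := by rw [hzlen]; omega
    rw [pvEndStepA]
    rw [PySem.List.pyGetD_eq_getElem F ("", 0) hi.1 h1,
      PySem.List.pyGetD_eq_getElem F ("", 0) (by omega) h2,
      PySem.List.pyGetD_eq_getElem (F.zip (F.drop 1)) (("", 0), ("", 0)) hi.1 h3]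
    simp only [List.getElem_zip, List.getElem_drop]
    simp only [show (i + 1).toNat = 1 + i.toNat from by omega]
  rw [PySem.List.foldl_congr_mem _ _ _ _ hcongr]
  have hrange : ((F.length : Int) - 1) = PySem.List.len (F.zip (F.drop 1)) := by
    simp [PySem.List.len]
    omega
  rw [hrange, PySem.List.foldl_pyRange_pyGetD (F.zip (F.drop 1)) (("", 0), ("", 0))
    (fun acc (p : (String × Int) × (String × Int)) => acc.insert p.1.1 (some (p.1.2, some p.2.2)))
    d le_rfl]
  simp

-- ===== lemmas for B's section-major search =====
theorem pvAnnFold (lines : List String) (acc : List (String × Int)) (cc : Int) :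
    (lines.foldl (fun (st : List (String × Int) × Int) line =>
      (st.1 ++ [(PySem.Str.strip (PySem.Str.lower line), st.2)], st.2 + PySem.Str.len line + 1))
      (acc, cc)).1 = acc ++ pvAnnF cc lines := by
  induction lines generalizing acc cc with
  | nil => simp [pvAnnF]
  | cons l ls ih =>
    simp only [List.foldl_cons]
    rw [ih, pvAnnF, List.append_assoc]
    rfl
theorem pvAll_ne (F : List (String × Int)) (k : String) :
    (F.all (fun e => e.1 != k)) = true ↔ k ∉ F.map (·.1) := by
  rw [List.all_eq_true]
  constructor
  · intro h hm
    obtain ⟨e, he, h1⟩ := List.mem_map.mp hm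
    exact (bne_iff_ne.mp (h e he)) h1
  · intro h e he
    exact bne_iff_ne.mpr (fun h1 => h (List.mem_map.mpr ⟨e, he, h1⟩))
theorem pvKwFoldMemB (ll : String) (cc : Int) (kws : List (String × List String))
    (hinj : kws.Pairwise (fun a b => a.1 ≠ b.1)) (F0 : List (String × Int)) :
    (∀ e : String × Int, e ∈ kws.foldl (pvKwStepB ll cc) F0 ↔
       e ∈ F0 ∨ ∃ kw ∈ kws, e = (kw.1, cc) ∧ kw.1 ∉ F0.map (·.1) ∧
         kw.2.any (fun w => PySem.Str.isIn w ll) = true) ∧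
    (∀ k : String, k ∈ (kws.foldl (pvKwStepB ll cc) F0).map (·.1) ↔
       k ∈ F0.map (·.1) ∨ ∃ kw ∈ kws, k = kw.1 ∧ kw.2.any (fun w => PySem.Str.isIn w ll) = true) := by
  induction kws generalizing F0 with
  | nil => constructor <;> intro x <;> simp
  | cons kw kws ih =>
    have hhead : ∀ kw' ∈ kws, kw.1 ≠ kw'.1 := fun kw' h => List.rel_of_pairwise_cons hinj h
    simp only [List.foldl_cons]
    by_cases hfr : kw.1 ∈ F0.map (·.1)
    · -- not fresh: step is identity
      have hstep : pvKwStepB ll cc F0 kw = F0 := by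
        rw [pvKwStepB, if_neg]
        simp only [Bool.and_eq_true, not_and]
        intro hall
        exact absurd ((pvAll_ne F0 kw.1).mp hall) (not_not_intro hfr)
      rw [hstep]
      obtain ⟨ihm, ihk⟩ := ih hinj.tail F0
      constructor
      · intro e
        rw [ihm e]
        constructor
        · rintro (h | ⟨kw', hkw', h⟩)
          · exact Or.inl h
          · exact Or.inr ⟨kw', List.mem_cons_of_mem _ hkw', h⟩
        · rintro (h | ⟨kw', hkw', he, hnf, hmm⟩)
          · exact Or.inl h
          · rcases List.mem_cons.mp hkw' with h1 | h1
            · exact absurd (h1 ▸ hfr) hnf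
            · exact Or.inr ⟨kw', h1, he, hnf, hmm⟩
      · intro k
        rw [ihk k]
        constructor
        · rintro (h | ⟨kw', hkw', h⟩)
          · exact Or.inl h
          · exact Or.inr ⟨kw', List.mem_cons_of_mem _ hkw', h⟩
        · rintro (h | ⟨kw', hkw', he, hmm⟩)
          · exact Or.inl h
          · rcases List.mem_cons.mp hkw' with h1 | h1
            · exact Or.inl (by rw [he, h1]; exact hfr)
            · exact Or.inr ⟨kw', h1, he, hmm⟩
    · by_cases hm : kw.2.any (fun w => PySem.Str.isIn w ll) = true
      · -- fresh and matching: step appends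
        have hstep : pvKwStepB ll cc F0 kw = F0 ++ [(kw.1, cc)] := by
          rw [pvKwStepB, if_pos]
          rw [Bool.and_eq_true]
          exact ⟨(pvAll_ne F0 kw.1).mpr hfr, hm⟩
        rw [hstep]
        obtain ⟨ihm, ihk⟩ := ih hinj.tail (F0 ++ [(kw.1, cc)])
        have hkeys1 : ∀ k, k ∈ (F0 ++ [(kw.1, cc)]).map (·.1) ↔
            k ∈ F0.map (·.1) ∨ k = kw.1 := by
          intro k
          rw [List.map_append, List.mem_append]
          simp
        constructor
        · intro e
          rw [ihm e]
          constructor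
          · rintro (h | ⟨kw', hkw', he, hnf, hmm⟩)
            · rcases List.mem_append.mp h with h | h
              · exact Or.inl h
              · simp at h
                exact Or.inr ⟨kw, List.mem_cons_self, by rw [h], hfr, hm⟩
            · rw [hkeys1] at hnf
              push_neg at hnf
              exact Or.inr ⟨kw', List.mem_cons_of_mem _ hkw', he, hnf.1, hmm⟩
          · rintro (h | ⟨kw', hkw', he, hnf, hmm⟩)
            · exact Or.inl (List.mem_append.mpr (Or.inl h))
            · rcases List.mem_cons.mp hkw' with h1 | h1
              · subst h1
                exact Or.inl (List.mem_append.mpr (Or.inr (by simp [he])))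
              · refine Or.inr ⟨kw', h1, he, ?_, hmm⟩
                rw [hkeys1]
                push_neg
                exact ⟨hnf, (hhead kw' h1).symm⟩
        · intro k
          rw [ihk k]
          constructor
          · rintro (h | ⟨kw', hkw', he, hmm⟩)
            · rcases (hkeys1 k).mp h with h | h
              · exact Or.inl h
              · exact Or.inr ⟨kw, List.mem_cons_self, h, hm⟩
            · exact Or.inr ⟨kw', List.mem_cons_of_mem _ hkw', he, hmm⟩
          · rintro (h | ⟨kw', hkw', he, hmm⟩)
            · exact Or.inl ((hkeys1 k).mpr (Or.inl h))
            · rcases List.mem_cons.mp hkw' with h1 | h1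
              · exact Or.inl ((hkeys1 k).mpr (Or.inr (h1 ▸ he)))
              · exact Or.inr ⟨kw', h1, he, hmm⟩
      · -- fresh but not matching: identity
        have hstep : pvKwStepB ll cc F0 kw = F0 := by
          rw [pvKwStepB, if_neg]
          simp only [Bool.and_eq_true, not_and]
          intro _
          exact hm
        rw [hstep]
        obtain ⟨ihm, ihk⟩ := ih hinj.tail F0
        constructor
        · intro e
          rw [ihm e]
          constructor
          · rintro (h | ⟨kw', hkw', h⟩)
            · exact Or.inl h
            · exact Or.inr ⟨kw', List.mem_cons_of_mem _ hkw', h⟩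
          · rintro (h | ⟨kw', hkw', he, hnf, hmm⟩)
            · exact Or.inl h
            · rcases List.mem_cons.mp hkw' with h1 | h1
              · exact absurd (h1 ▸ hmm) hm
              · exact Or.inr ⟨kw', h1, he, hnf, hmm⟩
        · intro k
          rw [ihk k]
          constructor
          · rintro (h | ⟨kw', hkw', h⟩)
            · exact Or.inl h
            · exact Or.inr ⟨kw', List.mem_cons_of_mem _ hkw', h⟩
          · rintro (h | ⟨kw', hkw', he, hmm⟩)
            · exact Or.inl h
            · rcases List.mem_cons.mp hkw' with h1 | h1
              · exact absurd (h1 ▸ hmm) hm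
              · exact Or.inr ⟨kw', h1, he, hmm⟩
theorem pvFirst_cons (ws : List String) (l : String) (cc : Int) (ls : List String) :
    pvFirst ws (pvAnnF cc (l :: ls)) =
      if (ws.any (fun w => PySem.Str.isIn w (PySem.Str.strip (PySem.Str.lower l)))) = true
      then some cc else pvFirst ws (pvAnnF (cc + PySem.Str.len l + 1) ls) := by
  rw [pvFirst, pvAnnF]
  simp only [List.find?_cons]
  by_cases h : (ws.any (fun w => PySem.Str.isIn w (PySem.Str.strip (PySem.Str.lower l)))) = true
  · rw [if_pos h]
    simp only [h]
    rfl
  · rw [if_neg h]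
    rw [Bool.not_eq_true] at h
    simp only [h]
    rfl
theorem pvScanMemB (lines : List String) (F0 : List (String × Int)) (cc0 : Int) :
    ∀ e : String × Int, e ∈ (lines.foldl pvLineStepB (F0, cc0)).1 ↔
      e ∈ F0 ∨ ∃ kw ∈ pvKeywords, kw.1 ∉ F0.map (·.1) ∧ e.1 = kw.1 ∧
        pvFirst kw.2 (pvAnnF cc0 lines) = some e.2 := by
  have hinj : pvKeywords.Pairwise (fun a b => a.1 ≠ b.1) := by decide
  have hname : ∀ kw ∈ pvKeywords, ∀ kw' ∈ pvKeywords, kw.1 = kw'.1 → kw.2 = kw'.2 := by decide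
  induction lines generalizing F0 cc0 with
  | nil =>
    intro e
    simp [pvAnnF, pvFirst]
  | cons l ls ih =>
    intro e
    simp only [List.foldl_cons]
    set ll := PySem.Str.strip (PySem.Str.lower l) with hll
    have hstep : pvLineStepB (F0, cc0) l =
        (pvKeywords.foldl (pvKwStepB ll cc0) F0, cc0 + PySem.Str.len l + 1) := rfl
    rw [hstep]
    obtain ⟨ihm, ihk⟩ := pvKwFoldMemB ll cc0 pvKeywords hinj F0
    rw [ih _ _ e]
    have hfirst : ∀ kw ∈ pvKeywords, pvFirst kw.2 (pvAnnF cc0 (l :: ls)) =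
        if kw.2.any (fun w => PySem.Str.isIn w ll) = true then some cc0
        else pvFirst kw.2 (pvAnnF (cc0 + PySem.Str.len l + 1) ls) := by
      intro kw _
      exact pvFirst_cons kw.2 l cc0 ls
    constructor
    · rintro (h | ⟨kw, hkw, hnf1, he1, hfm⟩)
      · -- e from the first line's keyword fold
        rcases (ihm e).mp h with h | ⟨kw, hkw, he, hnf, hmm⟩
        · exact Or.inl h
        · refine Or.inr ⟨kw, hkw, hnf, by rw [he], ?_⟩
          rw [hfirst kw hkw, if_pos hmm, he]
      · -- e from the rest
        rw [ihk kw.1] at hnf1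
        push_neg at hnf1
        obtain ⟨hnf0, hnm⟩ := hnf1
        have hnm' : ¬ kw.2.any (fun w => PySem.Str.isIn w ll) = true := by
          intro hc
          exact hnm kw hkw rfl hc
        refine Or.inr ⟨kw, hkw, hnf0, he1, ?_⟩
        rw [hfirst kw hkw, if_neg hnm']
        exact hfm
    · rintro (h | ⟨kw, hkw, hnf0, he1, hfm⟩)
      · exact Or.inl ((ihm e).mpr (Or.inl h))
      · rw [hfirst kw hkw] at hfm
        by_cases hmm : kw.2.any (fun w => PySem.Str.isIn w ll) = true
        · rw [if_pos hmm] at hfm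
          have he : e = (kw.1, cc0) := by
            obtain ⟨e1, e2⟩ := e
            simp at he1 hfm ⊢
            exact ⟨he1, hfm.symm⟩
          exact Or.inl ((ihm e).mpr (Or.inr ⟨kw, hkw, he, hnf0, hmm⟩))
        · rw [if_neg hmm] at hfm
          refine Or.inr ⟨kw, hkw, ?_, he1, hfm⟩
          rw [ihk kw.1]
          push_neg
          refine ⟨hnf0, ?_⟩
          intro kw' hkw' hne hc
          exact hmm (by rw [hname kw hkw kw' hkw' hne]; exact hc)
theorem pvFound0Eq (lines : List String) :
    PySem.List.sorted
      (("contact", (0 : Int)) ::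
        pvKeywords.filterMap (fun kw =>
          ((pvAnnF 0 lines).find? (fun p => kw.2.any (fun w => PySem.Str.isIn w p.1))).map
            (fun p => (kw.1, p.2))))
      (fun x => x.2) false = (lines.foldl pvLineStepB ([("contact", 0)], 0)).1 := by
  set found0 := ("contact", (0 : Int)) ::
    pvKeywords.filterMap (fun kw =>
      ((pvAnnF 0 lines).find? (fun p => kw.2.any (fun w => PySem.Str.isIn w p.1))).map
        (fun p => (kw.1, p.2))) with hfound0
  set F := (lines.foldl pvLineStepB ([("contact", 0)], 0)).1 with hF
  have hinv0 : pvInv [("contact", 0)] 0 := by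
    refine ⟨⟨[], rfl⟩, by simp, ?_, by simp, by simp⟩
    intro e he
    simp at he
    rw [he]
    decide
  obtain ⟨_, hinv, _⟩ := pvScan lines [("contact", 0)] 0 hinv0
    (by intro e he; simp at he; exact Or.inr he)
  obtain ⟨⟨r, hr⟩, hnd, hnames, hpw, hle⟩ := hinv
  -- found0 is pairwise increasing in section rank
  have hpair0 : found0.Pairwise (fun a b => pvRank a.1 < pvRank b.1) := by
    rw [hfound0]
    refine List.Pairwise.cons ?_ ?_
    · intro e he
      rw [List.mem_filterMap] at he
      obtain ⟨kw, hkw, hf⟩ := he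
      obtain ⟨p, _, hp⟩ := Option.map_eq_some_iff.mp hf
      have h1 : e.1 = kw.1 := by rw [← hp]
      have hc : pvRank ("contact", (0:Int)).1 = 0 := by decide
      rw [hc, h1]
      have hkmem : kw.1 ∈ pvNames ∧ kw.1 ≠ "contact" :=
        (by decide : ∀ kw ∈ pvKeywords, kw.1 ∈ pvNames ∧ kw.1 ≠ "contact") kw hkw
      exact pvRank_pos kw.1 hkmem.1 hkmem.2
    · rw [List.pairwise_filterMap]
      have hkp : pvKeywords.Pairwise (fun a b => pvRank a.1 < pvRank b.1) := by decide
      refine hkp.imp_of_mem ?_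
      intro a b _ _ hab x hx y hy
      obtain ⟨p, _, hp⟩ := Option.map_eq_some_iff.mp hx
      obtain ⟨q, _, hq⟩ := Option.map_eq_some_iff.mp hy
      rw [← hp, ← hq]
      exact hab
  have hpair0' : found0.Pairwise (fun a b => pvRank a.1 < pvRank b.1) := hpair0
  have hnd0 : found0.Nodup := (hpair0.imp (fun h => by
    intro heq
    rw [heq] at h
    omega))
  have hndF : F.Nodup := hnd.of_map
  -- same members
  have hmem : ∀ e, e ∈ found0 ↔ e ∈ F := by
    intro e
    rw [hF, pvScanMemB lines [("contact", 0)] 0 e, hfound0]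
    rw [List.mem_cons, List.mem_filterMap]
    constructor
    · rintro (h | ⟨kw, hkw, hf⟩)
      · exact Or.inl (by simp [h])
      · obtain ⟨p, hfind, hp⟩ := Option.map_eq_some_iff.mp hf
        have hnc : kw.1 ∉ ([(("contact" : String), (0:Int))]).map (·.1) := by
          have h := (by decide : ∀ kw ∈ pvKeywords, kw.1 ≠ "contact") kw hkw
          simpa using h
        refine Or.inr ⟨kw, hkw, hnc, by rw [← hp], ?_⟩
        rw [pvFirst, hfind, ← hp]
        rfl
    · rintro (h | ⟨kw, hkw, _, he1, hfm⟩)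
      · simp at h
        exact Or.inl h
      · rw [pvFirst] at hfm
        obtain ⟨p, hfind, hp⟩ := Option.map_eq_some_iff.mp hfm
        refine Or.inr ⟨kw, hkw, ?_⟩
        rw [hfind]
        simp only [Option.map_some]
        obtain ⟨e1, e2⟩ := e
        simp at he1 hp ⊢
        exact ⟨he1.symm, hp⟩
  have hperm : found0.Perm F := (List.perm_ext_iff_of_nodup hnd0 hndF).mpr hmem
  have hsorted := pvSorted_pairwise_stable (fun x : String × Int => x.2)
    (fun a b => pvRank a.1 < pvRank b.1) found0 hpair0'
  refine List.Perm.eq_of_pairwise ?_ hsorted hpw ((PySem.List.sorted_perm found0 _ _).trans hperm)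
  intro a b _ _ h1 h2
  rcases h1 with h1 | ⟨h1, h1'⟩ <;> rcases h2 with h2 | ⟨h2, h2'⟩ <;> omega

theorem pv_main (rt : String) : extract_section_boundaries rt = extract_section_boundaries_alt rt := by
  rw [extract_section_boundaries, extract_section_boundaries_alt]
  set lines := (PySem.Str.split? rt "\n").getD [] with hlines
  set n := PySem.Str.len rt with hn
  have hinit : (PySem.Dict.ofList [("contact", some ((0:Int), some (500:Int))), ("summary", none),
      ("experience", none), ("projects", none), ("education", none), ("skills", none),
      ("certifications", none)]) = pvDict [("contact", 0)] := by decide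
  have hinv0 : pvInv [("contact", 0)] 0 := by
    refine ⟨⟨[], rfl⟩, by simp, ?_, by simp, by simp⟩
    intro e he
    simp at he
    rw [he]
    decide
  obtain ⟨hdict, hinv, _⟩ := pvScan lines [("contact", 0)] 0 hinv0
    (by intro e he; simp at he; exact Or.inr he)
  set F := (lines.foldl pvLineStepB ([("contact", 0)], 0)).1 with hF
  set cc := (lines.foldl pvLineStepB ([("contact", 0)], 0)).2 with hcc
  obtain ⟨⟨r, hr⟩, hnd, hnames, hpw, hle⟩ := hinv
  have hne : F ≠ [] := by rw [hr]; simp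
  rw [hinit, hdict]
  rw [pvSectionList F cc ⟨⟨r, hr⟩, hnd, hnames, hpw, hle⟩]
  -- B's annotation pass computes pvAnnF 0 lines, so B's found list is F too
  rw [pvAnnFold lines [] 0, List.nil_append, pvFound0Eq lines, ← hF]
  have hemp : F.isEmpty = false := by rw [hr]; rfl
  simp only [hemp, Bool.false_eq_true, if_false, pv_pyGetD_neg_one F hne]
  rw [pvEndFold F hne (pvDict F)]
  -- A's patched dict: fold of pvChunks-shaped updates
  have hsplit : ((List.foldl (fun d (u : String × Option (Int × Option Int)) => d.insert u.1 u.2)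
      (pvDict F) ((F.zip (F.drop 1)).map (fun p => (p.1.1, some (p.1.2, some p.2.2))))).insert
      (F.getLast hne).1 (some ((F.getLast hne).2, some n))) =
    List.foldl (fun d (u : String × Option (Int × Option Int)) => d.insert u.1 u.2) (pvDict F)
      (((F.zip (F.drop 1)).map (fun p => (p.1.1, some (p.1.2, some p.2.2)))) ++
        [((F.getLast hne).1, some ((F.getLast hne).2, some n))]) := by
    rw [List.foldl_append]; rfl
  rw [hsplit]
  have hupds : ((F.zip (F.drop 1)).map (fun p => (p.1.1, some (p.1.2, some p.2.2)))) ++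
      [((F.getLast hne).1, some ((F.getLast hne).2, some n))] =
      (pvChunks F n).map (fun q => (q.1, some (q.2.1, some q.2.2))) := by
    rw [pvChunks_decomp F hne n, List.map_append, List.map_map]
    rfl
  rw [hupds]
  have hkeysA : ((pvChunks F n).map (fun q => (q.1, some (q.2.1, some q.2.2)))).map (·.1) =
      F.map (·.1) := by
    rw [List.map_map]
    exact pvChunks_map_fst F n
  rw [show pvDict F = PySem.Dict.mk (pvNames.map (fun s => (s, pvVal F s))) from rfl]
  rw [pvDict_foldl_insert _ (pvVal F) (by
    intro u hu
    have : u.1 ∈ ((pvChunks F n).map (fun q => (q.1, some (q.2.1, some q.2.2)))).map (·.1) :=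
      List.mem_map.mpr ⟨u, hu, rfl⟩
    rw [hkeysA] at this
    obtain ⟨e, he, h1⟩ := List.mem_map.mp this
    exact h1 ▸ hnames e he)]
  -- B's patched dict: fold of the same chunks with directly-typed values
  rw [PySem.List.slice_from F (by norm_num)]
  rw [show ((1:Int).toNat) = 1 from rfl]
  have hzipB : (F.zip ((F.drop 1).map (·.2) ++ [n])).foldl
      (fun (d : PySem.Dict String (Option (Int × Int))) p => d.insert p.1.1 (some (p.1.2, p.2)))
      (PySem.Dict.mk (pvNames.map (fun s => (s, none)))) =
      ((pvChunks F n).map (fun q => (q.1, some q.2))).foldl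
        (fun d (u : String × Option (Int × Int)) => d.insert u.1 u.2)
        (PySem.Dict.mk (pvNames.map (fun s => (s, none)))) := by
    rw [← pvChunks_zip F n, List.map_map, List.foldl_map]
    rfl
  rw [hzipB]
  have hkeysB : ((pvChunks F n).map (fun q => (q.1, some q.2))).map
      (fun u : String × Option (Int × Int) => u.1) = F.map (·.1) := by
    rw [List.map_map]
    exact pvChunks_map_fst F n
  rw [pvDict_foldl_insert ((pvChunks F n).map (fun q => (q.1, some q.2)))
    (fun _ => (none : Option (Int × Int))) (by
      intro u hu
      have : u.1 ∈ ((pvChunks F n).map (fun q => (q.1, some q.2))).map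
          (fun u : String × Option (Int × Int) => u.1) := List.mem_map.mpr ⟨u, hu, rfl⟩
      rw [hkeysB] at this
      obtain ⟨e, he, h1⟩ := List.mem_map.mp this
      exact h1 ▸ hnames e he)]
  show (pvNames.map (fun s => (s, pvApply ((pvChunks F n).map
      (fun q => (q.1, some (q.2.1, some q.2.2)))) (pvVal F) s))).map
      (fun kv => (kv.1, kv.2.bind fun v => Option.map (fun e => (v.1, e)) v.2)) =
    pvNames.map (fun s => (s, pvApply ((pvChunks F n).map (fun q => (q.1, some q.2)))
      (fun _ => (none : Option (Int × Int))) s))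
  rw [List.map_map]
  apply List.map_congr_left
  intro k hk
  simp only [Function.comp]
  rw [pvApply_find? _ _ k (by rw [hkeysA]; exact hnd),
    pvApply_find? _ _ k (by rw [hkeysB]; exact hnd)]
  rw [pv_find?_map_fst (pvChunks F n) _ k, pv_find?_map_fst (pvChunks F n) _ k]
  cases hfind : (pvChunks F n).find? (fun q => q.1 == k) with
  | none =>
    simp only [Option.map_none, Option.getD_none]
    have hkmem : k ∉ F.map (·.1) := by
      intro hmem
      rw [← pvChunks_map_fst F n] at hmem
      obtain ⟨q, hq, h1⟩ := List.mem_map.mp hmem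
      rw [List.find?_eq_none] at hfind
      exact (hfind q hq) (by simp [h1])
    have hkc : k ≠ "contact" := by
      intro h
      rw [h, hr] at hkmem
      exact hkmem List.mem_cons_self
    rw [pvVal, if_neg hkc, (pvAssoc_eq_none_iff F k).mpr hkmem]
    rfl
  | some q =>
    simp only [Option.map_some, Option.getD_some]
    rfl

-- ===== VERDICT (by name: the statement is the Claim_ definition above) =====
theorem extract_section_boundaries_spec : Claim_equal_extract_section_boundaries := by
  intro resume_text _
  unfold Spec_extract_section_boundaries
  exact pv_main resume_text
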